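-- pv_equiv track=rewrite | github.com/Mohammed-A-Amin/tritonsensors-plextech | radar-pointcloud-people-counter-master/smoothing/radar_temporal_smoothing.py | parse_people_label
-- ===== SOURCE A (Python) =====
-- def parse_people_label(lbl: str) -> int:
--     """Parse labels like '1_person', '2_person', '3_person' to integer counts."""
--     if lbl is None:
--         raise ValueError("Ground-truth label is None.")
--
--     s = str(lbl).strip().lower()
--     num = ""
--     for ch in s:
--         if ch.isdigit():
--             num += ch
--         elif num:
--             break
--
--     if not num:
--         raise ValueError(f"Could not parse integer people count from label: {lbl}")
--     return int(num)
-- ===== SOURCE B (Python) =====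
-- def parse_people_label(lbl: str) -> int:
--     """Parse labels like '1_person', '2_person', '3_person' to integer counts."""
--     if lbl is None:
--         raise ValueError("Ground-truth label is None.")
--
--     s = str(lbl).strip().lower()
--     n = len(s)
--     # two-pointer scan: i = start of first digit run, j = its end
--     i = 0
--     while i < n and not s[i].isdigit():
--         i += 1
--     j = i
--     while j < n and s[j].isdigit():
--         j += 1
--
--     if i == n:
--         raise ValueError(f"Could not parse integer people count from label: {lbl}")
--     return int(s[i:j])
-- ===== Notes on version B (the rewrite author's own statement) =====
-- stated objective: alternative
-- what changed: Replaces A's accumulate-characters-with-break loop by a two-pointer index scan that locates the first digit run and converts the slice s[i:j] directly, building no intermediate string character by character.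
import Mathlib
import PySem

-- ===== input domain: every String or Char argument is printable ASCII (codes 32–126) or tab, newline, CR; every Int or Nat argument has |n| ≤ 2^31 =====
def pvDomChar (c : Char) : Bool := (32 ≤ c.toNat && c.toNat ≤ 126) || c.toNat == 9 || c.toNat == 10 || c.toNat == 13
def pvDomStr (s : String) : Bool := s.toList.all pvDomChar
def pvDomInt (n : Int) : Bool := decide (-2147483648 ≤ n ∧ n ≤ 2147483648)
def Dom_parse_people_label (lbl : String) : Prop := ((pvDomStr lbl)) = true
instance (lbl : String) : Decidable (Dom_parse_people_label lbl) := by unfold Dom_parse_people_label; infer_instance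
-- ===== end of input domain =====

-- B replaces A's accumulate-with-break character loop by a two-pointer index scan over the
-- first digit run, converting the slice directly (alternative decomposition, same cost).


-- ===== PORT A =====
-- A's for-loop: accumulate digits into num, break at the first non-digit once num is nonempty.
def pplLoop (num : List Char) : List Char → List Char
  | [] => num
  | c :: rest =>
    if PySem.Chars.isdigit c then pplLoop (num ++ [c]) rest
    else if num ≠ [] then num
    else pplLoop num rest

def parse_people_label (lbl : String) : Int :=
  let s := PySem.Str.lower (PySem.Str.strip lbl)
  let num := pplLoop [] s.toList
  -- Python raises ValueError when num is empty (ofChars? [] = none); outside Pre_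
  (PySem.Int.ofChars? num).getD 0

-- ===== PORT B =====
-- the two while-loops of Source B: advance a pointer while the predicate holds
def pplCountWhile (p : Char → Bool) : List Char → Nat
  | [] => 0
  | c :: rest => if p c then pplCountWhile p rest + 1 else 0

def parse_people_label_alt (lbl : String) : Int :=
  let cs := (PySem.Str.lower (PySem.Str.strip lbl)).toList
  let i := pplCountWhile (fun c => !(PySem.Chars.isdigit c)) cs
  let j := i + pplCountWhile PySem.Chars.isdigit (cs.drop i)
  if i = cs.length then 0   -- Python raises ValueError here (no digit); outside Pre_
  else
    -- s[i:j] with 0 ≤ i ≤ j: exact as drop/take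
    (PySem.Int.ofChars? ((cs.drop i).take (j - i))).getD 0

-- ===== PRECONDITION & SPEC =====
-- Pre_ excludes exactly the labels without any decimal digit, on which Python A raises ValueError.
def Pre_parse_people_label (lbl : String) : Prop :=
  lbl.toList.any PySem.Chars.isdigit = true
instance (lbl : String) : Decidable (Pre_parse_people_label lbl) := by unfold Pre_parse_people_label; infer_instance
def pvWitness_parse_people_label : String := "2_person"

def Spec_parse_people_label (lbl : String) (out : Int) : Prop := out = parse_people_label_alt lbl
instance (lbl : String) (out : Int) : Decidable (Spec_parse_people_label lbl out) := by unfold Spec_parse_people_label; infer_instance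

-- ===== CLAIM (what is proved, stated in full; the proofs are below) =====
def Claim_equal_parse_people_label : Prop := ∀ (lbl : String), Dom_parse_people_label lbl → Pre_parse_people_label lbl → Spec_parse_people_label lbl (parse_people_label lbl)

-- ===== LEMMAS AND PROOFS =====
-- Once num is nonempty, A's loop appends exactly the remaining digit prefix.
theorem pplLoop_run (l num : List Char) (h : num ≠ []) :
    pplLoop num l = num ++ l.takeWhile PySem.Chars.isdigit := by
  induction l generalizing num with
  | nil => simp [pplLoop]
  | cons c rest ih =>
    by_cases hc : PySem.Chars.isdigit c
    · simp [pplLoop, hc, ih (num ++ [c]) (by simp)]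
    · simp [pplLoop, hc, h]

-- A's loop computes the first maximal digit run.
theorem pplLoop_eq (l : List Char) :
    pplLoop [] l =
      (l.dropWhile (fun c => !(PySem.Chars.isdigit c))).takeWhile PySem.Chars.isdigit := by
  induction l with
  | nil => simp [pplLoop]
  | cons c rest ih =>
    by_cases hc : PySem.Chars.isdigit c
    · simp [pplLoop, hc, pplLoop_run rest [c] (by simp)]
    · simp [pplLoop, hc, ih]

theorem pplCountWhile_eq (p : Char → Bool) (l : List Char) :
    pplCountWhile p l = (l.takeWhile p).length := by
  induction l with
  | nil => simp [pplCountWhile]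
  | cons c rest ih =>
    by_cases hc : p c <;> simp [pplCountWhile, hc, ih]

theorem drop_length_takeWhile (p : Char → Bool) (l : List Char) :
    l.drop (l.takeWhile p).length = l.dropWhile p := by
  induction l with
  | nil => simp
  | cons c rest ih =>
    by_cases hc : p c <;> simp [hc, ih]

theorem take_length_takeWhile (p : Char → Bool) (l : List Char) :
    l.take (l.takeWhile p).length = l.takeWhile p := by
  induction l with
  | nil => simp
  | cons c rest ih =>
    by_cases hc : p c <;> simp [hc, ih]

-- the two ports agree on EVERY input (both return 0 where Python raises)
theorem ports_agree (lbl : String) : parse_people_label lbl = parse_people_label_alt lbl := by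
  simp only [parse_people_label, parse_people_label_alt]
  generalize (PySem.Str.lower (PySem.Str.strip lbl)).toList = cs
  rw [pplLoop_eq, pplCountWhile_eq, pplCountWhile_eq]
  by_cases h : (cs.takeWhile (fun c => !(PySem.Chars.isdigit c))).length = cs.length
  · have hrun : cs.dropWhile (fun c => !(PySem.Chars.isdigit c)) = [] := by
      rw [← drop_length_takeWhile, h, List.drop_length]
    have hz : PySem.Int.ofChars? ([] : List Char) = none := by decide
    rw [hrun, if_pos h]
    simp [hz]
  · rw [if_neg h, drop_length_takeWhile, Nat.add_sub_cancel_left, take_length_takeWhile]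

-- ===== VERDICT (by name: the statement is the Claim_ definition above) =====
theorem parse_people_label_spec : Claim_equal_parse_people_label := by
  intro lbl _ _
  unfold Spec_parse_people_label
  exact ports_agree lbl
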